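-- pv_equiv track=rewrite | github.com/ZhuoliYin/ViTSP_codes | exact_concorde/exact_concorde.py | determine_instance_boundary
-- ===== SOURCE A (Python) =====
-- def determine_instance_boundary(coordinates):
--     MARGIN = 0
--     x_min = min(coord[0] for coord in coordinates) - MARGIN
--     x_max = max(coord[0] for coord in coordinates) + MARGIN
--     y_min = min(coord[1] for coord in coordinates) - MARGIN
--     y_max = max(coord[1] for coord in coordinates) + MARGIN
--
--     grid_resolution = 1000 if max((x_max-x_min), (y_max-y_min)) > 5000 else 100
--
--     return int(x_min), int(x_max), int(y_min), int(y_max), int(grid_resolution)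
-- ===== SOURCE B (Python) =====
-- def determine_instance_boundary(coordinates):
--     it = iter(coordinates)
--     try:
--         x, y = next(it)
--     except StopIteration:
--         raise ValueError("determine_instance_boundary: empty coordinates")
--     x_min = x_max = x
--     y_min = y_max = y
--     for cx, cy in it:
--         if cx < x_min: x_min = cx
--         if cx > x_max: x_max = cx
--         if cy < y_min: y_min = cy
--         if cy > y_max: y_max = cy
--     grid_resolution = 1000 if max(x_max - x_min, y_max - y_min) > 5000 else 100
--     return int(x_min), int(x_max), int(y_min), int(y_max), int(grid_resolution)
-- ===== Notes on version B (the rewrite author's own statement) =====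
-- stated objective: simpler
-- what changed: Replaces four separate min/max generator passes over the list with one single loop that maintains all four extrema at once (seeded from the first element).
import Mathlib
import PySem

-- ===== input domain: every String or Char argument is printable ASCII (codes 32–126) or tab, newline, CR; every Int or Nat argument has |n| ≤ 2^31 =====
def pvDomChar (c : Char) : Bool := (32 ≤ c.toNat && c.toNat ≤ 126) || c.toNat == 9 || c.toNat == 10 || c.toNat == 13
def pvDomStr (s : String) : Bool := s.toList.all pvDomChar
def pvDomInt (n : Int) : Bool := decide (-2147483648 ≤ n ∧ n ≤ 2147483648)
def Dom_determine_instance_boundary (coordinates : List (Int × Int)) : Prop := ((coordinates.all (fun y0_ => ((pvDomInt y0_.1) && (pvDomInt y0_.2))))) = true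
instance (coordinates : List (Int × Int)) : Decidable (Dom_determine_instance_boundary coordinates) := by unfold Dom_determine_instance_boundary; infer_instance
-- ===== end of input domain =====

-- B replaces A's four separate min/max passes by one loop maintaining all four extrema (simpler, one pass).
-- ===== PORT A =====
-- min(coord[0] for ...) etc.: Python min/max over the generator, via PySem.List.min?/max? on the mapped list
def determine_instance_boundary (coordinates : List (Int × Int)) : Int × Int × Int × Int × Int :=
  match PySem.List.min? (coordinates.map (fun c => c.1)) (fun v => v),
        PySem.List.max? (coordinates.map (fun c => c.1)) (fun v => v),
        PySem.List.min? (coordinates.map (fun c => c.2)) (fun v => v),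
        PySem.List.max? (coordinates.map (fun c => c.2)) (fun v => v) with
  | some xmn, some xmx, some ymn, some ymx =>
      let x_min := xmn - 0
      let x_max := xmx + 0
      let y_min := ymn - 0
      let y_max := ymx + 0
      let grid_resolution : Int := if max (x_max - x_min) (y_max - y_min) > 5000 then 1000 else 100
      (x_min, x_max, y_min, y_max, grid_resolution)
  | _, _, _, _ => (0, 0, 0, 0, 0)   -- unreachable under Pre_ (Python raises ValueError on empty)

-- ===== PORT B =====
-- the single loop of Source B, updating the four running extrema element by element
def dib_loop : List (Int × Int) → Int → Int → Int → Int → Int × Int × Int × Int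
  | [], xmn, xmx, ymn, ymx => (xmn, xmx, ymn, ymx)
  | (cx, cy) :: t, xmn, xmx, ymn, ymx =>
      dib_loop t (if cx < xmn then cx else xmn) (if cx > xmx then cx else xmx)
                 (if cy < ymn then cy else ymn) (if cy > ymx then cy else ymx)

def determine_instance_boundary_alt (coordinates : List (Int × Int)) : Int × Int × Int × Int × Int :=
  match coordinates with
  | [] => (0, 0, 0, 0, 0)   -- unreachable under Pre_ (Source B raises ValueError on empty)
  | (x, y) :: t =>
      match dib_loop t x x y y with
      | (xmn, xmx, ymn, ymx) =>
          let grid_resolution : Int := if max (xmx - xmn) (ymx - ymn) > 5000 then 1000 else 100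
          (xmn, xmx, ymn, ymx, grid_resolution)

-- ===== PRECONDITION & SPEC =====
-- Python's min()/max() (and Source B) raise ValueError on an empty list, so empty input is excluded.
def Pre_determine_instance_boundary (coordinates : List (Int × Int)) : Prop := coordinates ≠ []
instance (coordinates : List (Int × Int)) : Decidable (Pre_determine_instance_boundary coordinates) := by unfold Pre_determine_instance_boundary; infer_instance
def pvWitness_determine_instance_boundary : (List (Int × Int)) := [(1, 2), (3, 4)]

def Spec_determine_instance_boundary (coordinates : List (Int × Int)) (out : Int × Int × Int × Int × Int) : Prop := out = determine_instance_boundary_alt coordinates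
instance (coordinates : List (Int × Int)) (out : Int × Int × Int × Int × Int) : Decidable (Spec_determine_instance_boundary coordinates out) := by unfold Spec_determine_instance_boundary; infer_instance

-- ===== CLAIM (what is proved, stated in full; the proofs are below) =====
def Claim_equal_determine_instance_boundary : Prop := ∀ (coordinates : List (Int × Int)), Dom_determine_instance_boundary coordinates → Pre_determine_instance_boundary coordinates → Spec_determine_instance_boundary coordinates (determine_instance_boundary coordinates)

-- ===== LEMMAS AND PROOFS =====
theorem dib_loop_eq (t : List (Int × Int)) (a b c d : Int) :
    dib_loop t a b c d =
      ((t.map (fun p => p.1)).foldl min a, (t.map (fun p => p.1)).foldl max b,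
       (t.map (fun p => p.2)).foldl min c, (t.map (fun p => p.2)).foldl max d) := by
  induction t generalizing a b c d with
  | nil => rfl
  | cons hd tl ih =>
    obtain ⟨cx, cy⟩ := hd
    simp only [dib_loop, List.map_cons, List.foldl_cons, ih]
    congr 1 <;> [skip; congr 1] <;> [skip; skip; congr 1]
    all_goals {
      congr 1
      simp only [min_def, max_def]
      split_ifs <;> omega
    }

-- ===== VERDICT (by name: the statement is the Claim_ definition above) =====
theorem determine_instance_boundary_spec : Claim_equal_determine_instance_boundary := by
  intro coordinates _ hpre
  unfold Spec_determine_instance_boundary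
  match coordinates with
  | [] => exact absurd rfl hpre
  | (x, y) :: t =>
    simp only [determine_instance_boundary, determine_instance_boundary_alt, List.map_cons,
      PySem.List.min?_id_cons, PySem.List.max?_id_cons, dib_loop_eq, sub_zero, add_zero]
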